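-- pv_equiv track=rewrite | github.com/anotherhobby/AutoMasker | AutoMasker.py | prev_item
-- ===== SOURCE A (Python) =====
-- def prev_item(itemlist, item):
--     revlist = itemlist.copy()
--     revlist.reverse()
--     found = False
--     for l in revlist:
--         if found:
--             return l
--         elif l is item:
--             found = True
--     return revlist[0]
-- ===== SOURCE B (Python) =====
-- def prev_item(itemlist, item):
--     idx = None
--     for i, l in enumerate(itemlist):
--         if l is item:
--             idx = i
--     if idx is None or idx == 0:
--         return itemlist[-1]
--     return itemlist[idx - 1]
-- ===== Notes on version B (the rewrite author's own statement) =====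
-- stated objective: alternative
-- what changed: Replaces A's reverse-copy plus boolean found-flag scan with a single forward pass that records the index of the last identity match, then returns itemlist[idx-1] (or itemlist[-1] when there is no match or the match is at index 0, the wrap-around).
-- outside the precondition, e.g. on prev_item([9, 2147483647, 2, 1, 0, 1, 115, -1000000], -1000000): A returns -1000000, B returns -1000000
import Mathlib
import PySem

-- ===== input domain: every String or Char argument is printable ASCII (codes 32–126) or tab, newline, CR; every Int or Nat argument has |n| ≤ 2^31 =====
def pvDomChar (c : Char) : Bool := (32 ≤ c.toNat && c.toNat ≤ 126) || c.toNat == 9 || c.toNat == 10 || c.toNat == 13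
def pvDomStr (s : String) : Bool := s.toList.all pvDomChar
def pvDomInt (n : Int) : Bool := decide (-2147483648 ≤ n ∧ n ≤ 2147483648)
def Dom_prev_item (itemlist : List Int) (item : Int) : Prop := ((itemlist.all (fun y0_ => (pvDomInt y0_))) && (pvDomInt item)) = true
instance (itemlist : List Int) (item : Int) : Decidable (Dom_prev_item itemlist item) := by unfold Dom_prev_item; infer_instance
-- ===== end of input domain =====

-- B replaces A's reverse-copy + found-flag scan with one forward pass tracking the last
-- matching index (alternative decomposition, same cost); equivalence of RETURN values only.

-- ===== PORT A =====
-- the for-loop over revlist with the `found` flag ('l is item' ported as equality on Int)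
def prevA_loop (item : Int) : List Int → Bool → Option Int
  | [], _ => none
  | l :: rest, found =>
    if found then some l
    else if l = item then prevA_loop item rest true
    else prevA_loop item rest found

def prev_item (itemlist : List Int) (item : Int) : Int :=
  let revlist := itemlist.reverse
  match prevA_loop item revlist false with
  | some v => v
  | none => PySem.List.pyGetD revlist 0 0   -- revlist[0]; IndexError on [] excluded by Pre_

-- ===== PORT B =====
-- the enumerate loop keeping the index of the last match ('l is item' ported as equality)
def prevB_lastIdx (itemlist : List Int) (item : Int) : Option Int :=
  (PySem.List.enumerate itemlist 0).foldl
    (fun acc p => if p.2 = item then some p.1 else acc) none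

def prev_item_alt (itemlist : List Int) (item : Int) : Int :=
  match prevB_lastIdx itemlist item with
  | none => PySem.List.pyGetD itemlist (-1) 0     -- itemlist[-1]
  | some i =>
    if i = 0 then PySem.List.pyGetD itemlist (-1) 0
    else PySem.List.pyGetD itemlist (i - 1) 0

-- ===== PRECONDITION & SPEC =====
-- Pre_ excludes the empty list, on which A raises IndexError (revlist[0]), and inputs whose
-- item value occurs in the list but lies outside CPython's small-int cache [-5, 256]: there
-- 'l is item' depends on object identity, not on the values, so A's result (and B's, which
-- uses the same identity test) is an interning accident no value-level port can pin down.
def Pre_prev_item (itemlist : List Int) (item : Int) : Prop :=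
  itemlist ≠ [] ∧ (item ∈ itemlist → (-5 ≤ item ∧ item ≤ 256))
instance (itemlist : List Int) (item : Int) : Decidable (Pre_prev_item itemlist item) := by
  unfold Pre_prev_item; infer_instance
def pvWitness_prev_item : List Int × Int := ([1, 2, 3], 2)

def Spec_prev_item (itemlist : List Int) (item : Int) (out : Int) : Prop := out = prev_item_alt itemlist item
instance (itemlist : List Int) (item : Int) (out : Int) : Decidable (Spec_prev_item itemlist item out) := by unfold Spec_prev_item; infer_instance

-- ===== CLAIM (what is proved, stated in full; the proofs are below) =====
def Claim_equal_prev_item : Prop := ∀ (itemlist : List Int) (item : Int), Dom_prev_item itemlist item → Pre_prev_item itemlist item → Spec_prev_item itemlist item (prev_item itemlist item)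

-- ===== LEMMAS AND PROOFS =====

lemma enumerate_append_singleton (xs : List Int) (a : Int) (s : Int) :
    PySem.List.enumerate (xs ++ [a]) s
      = PySem.List.enumerate xs s ++ [(s + xs.length, a)] := by
  induction xs generalizing s with
  | nil => simp [PySem.List.enumerate_cons, PySem.List.enumerate_nil]
  | cons x xs ih =>
      simp [PySem.List.enumerate_cons, ih]
      ring_nf

lemma lastIdx_append (xs : List Int) (a : Int) (item : Int) :
    prevB_lastIdx (xs ++ [a]) item
      = if a = item then some (xs.length : Int) else prevB_lastIdx xs item := by
  unfold prevB_lastIdx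
  rw [enumerate_append_singleton, List.foldl_append]
  simp

lemma lastIdx_bound (xs : List Int) (item i : Int)
    (h : prevB_lastIdx xs item = some i) : 0 ≤ i ∧ i < xs.length := by
  induction xs using List.reverseRecOn with
  | nil => simp [prevB_lastIdx, PySem.List.enumerate_nil] at h
  | append_singleton ys a ih =>
      rw [lastIdx_append] at h
      by_cases ha : a = item
      · simp [ha] at h
        subst h
        constructor <;> simp
      · simp [ha] at h
        rcases ih h with ⟨h1, h2⟩
        constructor
        · exact h1
        · simp; omega

lemma loop_true (item : Int) (xs : List Int) :
    prevA_loop item xs true = xs.head? := by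
  cases xs <;> simp [prevA_loop]

lemma key (item : Int) (xs : List Int) :
    prevA_loop item xs.reverse false
      = match prevB_lastIdx xs item with
        | none => none
        | some i => if i = 0 then none else xs[(i - 1).toNat]? := by
  induction xs using List.reverseRecOn with
  | nil => simp [prevA_loop, prevB_lastIdx, PySem.List.enumerate_nil]
  | append_singleton ys a ih =>
      rw [List.reverse_append, lastIdx_append]
      simp only [List.reverse_singleton, List.singleton_append, prevA_loop]
      by_cases ha : a = item
      · subst ha
        simp only [if_neg (show ¬(false = true) by simp), loop_true,
          List.head?_reverse]
        by_cases hy : ys = []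
        · subst hy; simp
        · have hl : 0 < ys.length := List.length_pos_iff.mpr hy
          show ys.getLast? = if (ys.length:Int) = 0 then none else _
          rw [if_neg (by omega)]
          have h1 : ((ys.length:Int) - 1).toNat = ys.length - 1 := by omega
          rw [h1, List.getLast?_eq_getElem?]
          rw [List.getElem?_append_left (by omega)]
      · rw [if_neg (by simp), if_neg ha, if_neg ha, ih]
        cases h : prevB_lastIdx ys item with
        | none => simp
        | some i =>
            rcases lastIdx_bound ys item i h with ⟨h0, hlt⟩
            by_cases hi : i = 0
            · simp [hi]
            · simp only [if_neg hi]
              rw [List.getElem?_append_left (by omega)]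

lemma pyGetD_neg_one_eq_rev_head (xs : List Int) (h : xs ≠ []) :
    PySem.List.pyGetD xs (-1) 0 = PySem.List.pyGetD xs.reverse 0 0 := by
  rw [PySem.List.pyGetD_neg_one xs 0 h, PySem.List.pyGetD_zero]
  rw [List.getD_eq_getElem?_getD, List.getElem?_reverse (by simpa using List.length_pos_iff.mpr h)]
  rw [List.getLast_eq_getElem]
  have hl : 0 < xs.length := List.length_pos_iff.mpr h
  rw [List.getElem?_eq_getElem (by omega)]
  simp

-- ===== VERDICT (by name: the statement is the Claim_ definition above) =====
theorem prev_item_spec : Claim_equal_prev_item := by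
  intro xs item _ hpre
  obtain ⟨hpre, -⟩ := hpre
  unfold Spec_prev_item prev_item prev_item_alt
  simp only [key]
  cases h : prevB_lastIdx xs item with
  | none => simp [pyGetD_neg_one_eq_rev_head xs hpre]
  | some i =>
      rcases lastIdx_bound xs item i h with ⟨h0, hlt⟩
      by_cases hi : i = 0
      · simp [hi, pyGetD_neg_one_eq_rev_head xs hpre]
      · simp only [if_neg hi]
        have hidx : (i - 1).toNat < xs.length := by omega
        have h2 : PySem.List.pyGetD xs (i - 1) 0 = xs.getD (i - 1).toNat 0 := by
          rw [show i - 1 = (((i - 1).toNat : Nat) : Int) by omega, PySem.List.pyGetD_natCast]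
          simp
        have hB : PySem.List.pyGetD xs (i - 1) 0 = xs[(i - 1).toNat] := by
          rw [h2, List.getD_eq_getElem?_getD, List.getElem?_eq_getElem hidx]
          rfl
        rw [List.getElem?_eq_getElem hidx, hB]
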